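-- pv_equiv track=rewrite | github.com/littlepure2333/pytorch-vgg | custom_dataset.py | label_map
-- ===== SOURCE A (Python) =====
-- def label_map(labels):
--     label_dict = {}
--     current_index = 0
--     map_index = 0
--     for label in labels:
--         if label not in label_dict:
--             label_dict[label] = map_index
--             map_index += 1
--         labels[current_index] = label_dict[label]
--         current_index += 1
--     return labels
-- ===== SOURCE B (Python) =====
-- def label_map(labels):
--     # dict-free: record the order of first appearances in a plain list,
--     # then remap each slot to its label's position in that list
--     order = []
--     for label in labels:
--         if label not in order:
--             order.append(label)
--     for i in range(len(labels)):
--         labels[i] = order.index(labels[i])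
--     return labels
-- ===== Notes on version B (the rewrite author's own statement) =====
-- stated objective: alternative
-- what changed: Drops the dict and its two counters entirely: B records first appearances in a plain ordered list and remaps each slot via list.index position lookup, instead of A's fused register-in-dict-and-overwrite single pass.
import Mathlib
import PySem

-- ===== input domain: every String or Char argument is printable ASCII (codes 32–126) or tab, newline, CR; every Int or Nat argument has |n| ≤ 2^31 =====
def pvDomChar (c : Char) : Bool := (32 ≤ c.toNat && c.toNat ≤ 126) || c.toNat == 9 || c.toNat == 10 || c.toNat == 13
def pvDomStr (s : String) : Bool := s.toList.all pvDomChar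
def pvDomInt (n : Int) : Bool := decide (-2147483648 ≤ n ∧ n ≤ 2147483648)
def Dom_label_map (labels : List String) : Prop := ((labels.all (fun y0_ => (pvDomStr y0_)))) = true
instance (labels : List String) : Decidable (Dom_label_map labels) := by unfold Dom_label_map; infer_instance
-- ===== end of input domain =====

-- B drops the dict: it collects first appearances into a plain ordered list, then remaps
-- each slot via its label's position in that list; both Pythons mutate `labels` in place identically,
-- and the theorem is about the returned value.


-- ===== PORT A =====
-- fused loop: register the label in the dict if unseen (counter map_index), then overwrite the slot
def labelMapAux (ls : List String) (d : PySem.Dict String Int) (mapIndex : Int) : List Int :=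
  match ls with
  | [] => []
  | l :: rest =>
    if (d.contains l) = false then
      let d' := d.insert l mapIndex
      (d'.getD l 0) :: labelMapAux rest d' (mapIndex + 1)
    else
      (d.getD l 0) :: labelMapAux rest d mapIndex

def label_map (labels : List String) : List Int :=
  labelMapAux labels PySem.Dict.empty 0

-- ===== PORT B =====
-- pass 1: order.append(label) for each unseen label
def buildOrder (ls : List String) (u : List String) : List String :=
  match ls with
  | [] => u
  | l :: rest => buildOrder rest (if l ∈ u then u else u ++ [l])

-- pass 2: labels[i] = order.index(labels[i]); index never fails since every label is in order
def label_map_alt (labels : List String) : List Int :=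
  let order := buildOrder labels []
  labels.map (fun l => ((PySem.List.index? order l).getD 0 : Nat))

-- ===== PRECONDITION & SPEC =====
def Spec_label_map (labels : List String) (out : List Int) : Prop := out = label_map_alt labels
instance (labels : List String) (out : List Int) : Decidable (Spec_label_map labels out) := by unfold Spec_label_map; infer_instance

-- ===== CLAIM (what is proved, stated in full; the proofs are below) =====
def Claim_equal_label_map : Prop := ∀ (labels : List String), Dom_label_map labels → Spec_label_map labels (label_map labels)

-- ===== LEMMAS AND PROOFS =====

-- B's order list only grows by appending, so an existing position survives pass 1
theorem buildOrder_index?_mono (ls : List String) (u : List String)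
    (k : String) (i : Nat) (h : PySem.List.index? u k = some i) :
    PySem.List.index? (buildOrder ls u) k = some i := by
  induction ls generalizing u with
  | nil => simpa [buildOrder] using h
  | cons l rest ih =>
    simp only [buildOrder]
    apply ih
    by_cases hm : l ∈ u
    · simpa [hm] using h
    · rw [if_neg hm, PySem.List.index?_append_of_mem]
      · exact h
      · exact (PySem.List.index?_isSome_iff u k).mp (by rw [h]; rfl)

-- connection between A's dict and B's order list
def DictOrder (d : PySem.Dict String Int) (u : List String) : Prop :=
  ∀ k, d.get? k = (PySem.List.index? u k).map Int.ofNat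

-- main invariant: the fused dict pass equals position lookup in the final order list
theorem labelMapAux_eq (ls : List String) (d : PySem.Dict String Int) (u : List String)
    (hinv : DictOrder d u) :
    labelMapAux ls d (u.length : Int)
      = ls.map (fun l => (((PySem.List.index? (buildOrder ls u) l).getD 0 : Nat) : Int)) := by
  induction ls generalizing d u with
  | nil => simp [labelMapAux]
  | cons l rest ih =>
    by_cases hm : l ∈ u
    · obtain ⟨i, hi⟩ : ∃ i, PySem.List.index? u l = some i := by
        exact Option.isSome_iff_exists.mp ((PySem.List.index?_isSome_iff u l).mpr hm)
      have hc : d.contains l = true := by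
        rw [PySem.Dict.contains_eq_isSome_get?, hinv l, hi]; rfl
      simp only [labelMapAux, hc, buildOrder, if_pos hm, List.map_cons]
      rw [if_neg (by simp)]
      have hd : d.getD l 0 = (i : Int) := by
        rw [PySem.Dict.getD_of_get?_eq_some _ _ (by rw [hinv l, hi]; rfl)]
        exact Int.ofNat_eq_natCast i
      rw [hd, buildOrder_index?_mono rest u l i hi]
      simp only [Option.getD_some]
      exact List.cons_eq_cons.mpr ⟨by omega, ih d u hinv⟩
    · have hc : d.contains l = false := by
        rw [PySem.Dict.contains_eq_isSome_get?, hinv l,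
          (PySem.List.index?_eq_none_iff u l).mpr hm]
        rfl
      have hu' : PySem.List.index? (u ++ [l]) l = some u.length :=
        PySem.List.index?_append_singleton_self u l hm
      have hinv' : DictOrder (d.insert l (u.length : Int)) (u ++ [l]) := by
        intro k
        by_cases hk : k = l
        · subst hk
          rw [PySem.Dict.get?_insert_self, hu']; rfl
        · rw [PySem.Dict.get?_insert_of_ne _ _ hk, hinv k]
          congr 1
          by_cases hku : k ∈ u
          · rw [PySem.List.index?_append_of_mem _ hku]
          · rw [(PySem.List.index?_eq_none_iff u k).mpr hku,
              (PySem.List.index?_eq_none_iff (u ++ [l]) k).mpr (by simp [hku, hk])]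
      simp only [labelMapAux, hc, buildOrder, if_neg hm, List.map_cons]
      rw [if_pos trivial]
      have hd : (d.insert l (u.length : Int)).getD l 0 = (u.length : Int) :=
        PySem.Dict.getD_of_get?_eq_some _ _ (PySem.Dict.get?_insert_self ..)
      rw [hd, buildOrder_index?_mono rest (u ++ [l]) l u.length hu']
      simp only [Option.getD_some]
      have := ih (d.insert l (u.length : Int)) (u ++ [l]) hinv'
      rw [List.length_append, List.length_singleton] at this
      push_cast at this ⊢
      exact List.cons_eq_cons.mpr ⟨rfl, this⟩

-- ===== VERDICT (by name: the statement is the Claim_ definition above) =====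
theorem label_map_spec : Claim_equal_label_map := by
  intro labels _
  show label_map labels = label_map_alt labels
  have hinv : DictOrder PySem.Dict.empty [] := by
    intro k; simp [PySem.List.index?_eq_idxOf?]
  have := labelMapAux_eq labels PySem.Dict.empty [] hinv
  simpa [label_map, label_map_alt] using this
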